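-- pv_equiv track=rewrite | github.com/DhrutikS257/CSE-5311-Algo | HW3/src/plot_2.py | f
-- ===== SOURCE A (Python) =====
-- def f(n):
--     x = 1
--     y = 1
--     for i in range(1, n+1):
--         for j in range(1, n+1):
--             x = x + 1
--             y = i + j
--     return x
-- ===== SOURCE B (Python) =====
-- def f(n):
--     # Closed form: the loops perform n*n increments when n > 0, none otherwise.
--     return 1 + n * n if n > 0 else 1
-- ===== Notes on version B (the rewrite author's own statement) =====
-- stated objective: faster
-- what changed: Replaced the nested increment loops by the closed form n*n + one (just one for non-positive n).
import Mathlib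
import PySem

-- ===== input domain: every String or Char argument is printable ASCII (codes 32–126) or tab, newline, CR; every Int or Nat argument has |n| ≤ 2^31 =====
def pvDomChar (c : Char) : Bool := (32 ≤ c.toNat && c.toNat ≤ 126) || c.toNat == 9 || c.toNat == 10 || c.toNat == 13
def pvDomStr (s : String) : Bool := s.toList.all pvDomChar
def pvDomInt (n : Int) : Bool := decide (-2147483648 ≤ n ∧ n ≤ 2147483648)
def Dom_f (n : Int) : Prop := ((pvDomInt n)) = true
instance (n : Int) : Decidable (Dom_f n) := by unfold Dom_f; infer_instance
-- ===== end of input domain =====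

-- B replaces A's n*n nested increment loops by the closed form 1 + n*n (1 for n ≤ 0): asymptotically faster.

-- ===== PORT A =====
-- nested for-loops over range(1, n+1) carrying state (x, y)
def f (n : Int) : Int :=
  let st := (PySem.List.pyRange 1 (n+1) 1).foldl
    (fun (st : Int × Int) i =>
      (PySem.List.pyRange 1 (n+1) 1).foldl
        (fun (st2 : Int × Int) j => (st2.1 + 1, i + j)) st) (1, 1)
  st.1

-- ===== PORT B =====
def f_alt (n : Int) : Int := if n > 0 then 1 + n * n else 1

-- ===== PRECONDITION & SPEC =====
def Spec_f (n : Int) (out : Int) : Prop := out = f_alt n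
instance (n : Int) (out : Int) : Decidable (Spec_f n out) := by unfold Spec_f; infer_instance

-- ===== CLAIM (what is proved, stated in full; the proofs are below) =====
def Claim_equal_f : Prop := ∀ (n : Int), Dom_f n → Spec_f n (f n)

-- ===== LEMMAS AND PROOFS =====
theorem pv_inner (i : Int) (xs : List Int) (st : Int × Int) :
    (xs.foldl (fun (st2 : Int × Int) j => (st2.1 + 1, i + j)) st).1
      = st.1 + xs.length := by
  induction xs generalizing st with
  | nil => simp
  | cons a t ih => simp [List.foldl, ih]; omega

theorem pv_outer (xs ys : List Int) (st : Int × Int) :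
    (xs.foldl (fun (st : Int × Int) i =>
        ys.foldl (fun (st2 : Int × Int) j => (st2.1 + 1, i + j)) st) st).1
      = st.1 + xs.length * ys.length := by
  induction xs generalizing st with
  | nil => simp
  | cons a t ih =>
    simp only [List.foldl, ih, pv_inner]
    push_cast [List.length_cons]
    ring

-- ===== VERDICT (by name: the statement is the Claim_ definition above) =====
theorem f_spec : Claim_equal_f := by
  intro n _
  unfold Spec_f f f_alt
  rw [pv_outer]
  simp only [PySem.List.length_pyRange_one]
  rcases le_or_gt n 0 with h | h
  · have h0 : (n + 1 - 1).toNat = 0 := by omega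
    rw [h0, if_neg (not_lt.mpr h)]
    simp
  · have h1 : (n + 1 - 1).toNat = n.toNat := by omega
    have h2 : (n.toNat : Int) = n := Int.toNat_of_nonneg (le_of_lt h)
    simp only [h1, if_pos h]
    push_cast [h2]
    ring
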